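-- pv_equiv track=rewrite | github.com/devshivamthakur/DSA | Stack_practise.py | alignLibrary
-- ===== SOURCE A (Python) =====
-- class Stack:
--     def __init__(self):
--         self.container = []
--
--     def push(self, val):
--         self.container.append(val)
--
--     def pop(self):
--         return self.container.pop()
--
--     def peek(self):
--         return self.container[-1]
--
--     def is_empty(self):
--         return len(self.container) == 0
--
--     def size(self):
--         return len(self.container)
--
-- def alignLibrary(string):
--     stack = Stack()
--     book = Stack()
--     str = ''
--     for ch in string:
--         if ch=="\\":
--             while stack.peek() !="/":
--                 str+=stack.pop()
--             stack.pop()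
--             for char in str:
--                 stack.push(char)
--             str=""
--         else:
--             stack.push(ch)
--
--     return "".join(stack.container)
-- ===== SOURCE B (Python) =====
-- def alignLibrary(string):
--     stk = []
--     cur = ''
--     for ch in string:
--         if ch == '/':
--             stk.append(cur)
--             cur = ''
--         elif ch == '\\':
--             cur = stk.pop() + cur[::-1]
--         else:
--             cur += ch
--     return '/'.join(stk + [cur])
-- ===== Notes on version B (the rewrite author's own statement) =====
-- stated objective: alternative
-- what changed: B keeps a stack of segment buffers (pushing the buffer at each opening delimiter, popping and prepending it to the reversed buffer at each closing delimiter) and joins the segments once at the end, instead of A's single character stack that is popped character-by-character and re-pushed at every closing delimiter.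
import Mathlib
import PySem

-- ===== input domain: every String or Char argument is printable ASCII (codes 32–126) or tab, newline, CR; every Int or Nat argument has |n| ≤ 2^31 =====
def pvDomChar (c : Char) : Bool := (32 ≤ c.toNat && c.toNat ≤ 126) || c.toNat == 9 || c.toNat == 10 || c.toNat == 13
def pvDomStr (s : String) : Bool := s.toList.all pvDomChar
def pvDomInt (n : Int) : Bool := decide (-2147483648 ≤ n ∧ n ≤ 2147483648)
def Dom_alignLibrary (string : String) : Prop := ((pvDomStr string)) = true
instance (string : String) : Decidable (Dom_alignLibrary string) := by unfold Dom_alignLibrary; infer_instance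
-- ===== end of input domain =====

-- B replaces A's single char stack (rescanned and re-pushed character by character at every
-- '\') by a stack of segment buffers joined with '/' at the end (objective: alternative).

-- ===== PORT A =====
-- A's stack container, stored top-first (Python appends/pops at the right; we cons/uncons
-- at the left and reverse at the final join).  'none' = Python raised IndexError.

-- the 'while stack.peek() != "/": str += stack.pop()' loop plus the 'stack.pop()' of '/';
-- returns (container after the pops, accumulated str); none = peek on empty stack
def pvPopUntilA (c : List Char) (acc : List Char) : Option (List Char × List Char) :=
  match c with
  | [] => none
  | t :: rest => if t = '/' then some (rest, acc) else pvPopUntilA rest (acc ++ [t])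

-- one iteration of A's for-loop (str is '' at every loop head, so it is local to the branch)
def pvStepA (st : Option (List Char)) (ch : Char) : Option (List Char) :=
  st.bind fun c =>
    if ch = '\\' then
      match pvPopUntilA c [] with
      | none => none
      | some (c', s) => some (s.reverse ++ c')   -- 'for char in str: stack.push(char)'
    else some (ch :: c)

def alignLibrary (string : String) : String :=
  match string.toList.foldl pvStepA (some []) with
  | none => ""                                   -- unreachable under Pre_
  | some c => String.mk c.reverse                -- '"".join(stack.container)'

-- ===== PORT B =====
-- one iteration of B's for-loop over state (stk, cur); stk stored top-first
def pvStepB (st : Option (List (List Char) × List Char)) (ch : Char) :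
    Option (List (List Char) × List Char) :=
  st.bind fun p =>
    if ch = '/' then some (p.2 :: p.1, [])
    else if ch = '\\' then
      match p.1 with
      | [] => none                               -- stk.pop() raises
      | top :: rest => some (rest, top ++ p.2.reverse)
    else some (p.1, p.2 ++ [ch])

-- port of '/'.join(...)
def pvJoinSlash : List (List Char) → List Char
  | [] => []
  | [c] => c
  | c :: rest => c ++ '/' :: pvJoinSlash rest

def alignLibrary_alt (string : String) : String :=
  match string.toList.foldl pvStepB (some ([], [])) with
  | none => ""                                   -- unreachable under Pre_
  | some (stk, cur) => String.mk (pvJoinSlash (stk.reverse ++ [cur]))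

-- ===== PRECONDITION & SPEC =====
-- Pre_ excludes exactly the inputs on which A raises IndexError: some prefix of the string
-- contains more '\' characters than '/' characters (A's stack then holds no '/' to pop to).
def Pre_alignLibrary (string : String) : Prop :=
  ∀ n ∈ List.range (string.toList.length + 1),
    (string.toList.take n).count '\\' ≤ (string.toList.take n).count '/'
instance (string : String) : Decidable (Pre_alignLibrary string) := by
  unfold Pre_alignLibrary; infer_instance

def pvWitness_alignLibrary : String := "/ab/cd\\ef\\"

def Spec_alignLibrary (string : String) (out : String) : Prop := out = alignLibrary_alt string
instance (string : String) (out : String) : Decidable (Spec_alignLibrary string out) := by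
  unfold Spec_alignLibrary; infer_instance

-- ===== CLAIM (what is proved, stated in full; the proofs are below) =====
def Claim_equal_alignLibrary : Prop := ∀ (string : String), Dom_alignLibrary string → Pre_alignLibrary string → Spec_alignLibrary string (alignLibrary string)

-- ===== LEMMAS AND PROOFS =====

-- A's container reconstructed from B's state (top-first)
def pvConv (stk : List (List Char)) (cur : List Char) : List Char :=
  cur.reverse ++ stk.flatMap (fun s => '/' :: s.reverse)

lemma pvPopUntilA_skip (u : List Char) (hu : '/' ∉ u) :
    ∀ rest acc, pvPopUntilA (u ++ rest) acc = pvPopUntilA rest (acc ++ u) := by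
  induction u with
  | nil => intro rest acc; simp
  | cons a t ih =>
      intro rest acc
      have ha : a ≠ '/' := fun h => hu (h ▸ List.mem_cons_self)
      have ht : '/' ∉ t := fun h => hu (List.mem_cons_of_mem _ h)
      simp [pvPopUntilA, ha, ih ht]

lemma pvJoinSlash_cons (a : List Char) (t : List (List Char)) (h : t ≠ []) :
    pvJoinSlash (a :: t) = a ++ '/' :: pvJoinSlash t := by
  cases t with
  | nil => exact absurd rfl h
  | cons b s => simp [pvJoinSlash]

lemma pvJoinSlash_merge (l : List (List Char)) (a b : List Char) :
    pvJoinSlash (l ++ [a, b]) = pvJoinSlash (l ++ [a ++ '/' :: b]) := by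
  induction l with
  | nil => simp [pvJoinSlash]
  | cons x xs ih =>
      rw [List.cons_append, List.cons_append,
          pvJoinSlash_cons x _ (by simp), pvJoinSlash_cons x _ (by simp), ih]

lemma pvConv_reverse (stk : List (List Char)) (cur : List Char) :
    (pvConv stk cur).reverse = pvJoinSlash (stk.reverse ++ [cur]) := by
  induction stk generalizing cur with
  | nil => simp [pvConv, pvJoinSlash]
  | cons s t ih =>
      have h1 : (pvConv (s :: t) cur).reverse = (pvConv t (s ++ '/' :: cur)).reverse := by
        simp [pvConv]
      rw [h1, ih, ← pvJoinSlash_merge]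
      simp

-- main invariant: running A's fold from conv(stk,cur) mirrors running B's fold from (stk,cur)
lemma pvMain (l : List Char) :
    ∀ (stk : List (List Char)) (cur : List Char),
      '/' ∉ cur → (∀ s ∈ stk, '/' ∉ s) →
      (∀ n ≤ l.length, (l.take n).count '\\' ≤ (l.take n).count '/' + stk.length) →
      ∃ stk' cur',
        l.foldl pvStepB (some (stk, cur)) = some (stk', cur') ∧
        l.foldl pvStepA (some (pvConv stk cur)) = some (pvConv stk' cur') ∧
        '/' ∉ cur' ∧ (∀ s ∈ stk', '/' ∉ s) := by
  induction l with
  | nil => intro stk cur hcur hstk _; exact ⟨stk, cur, rfl, rfl, hcur, hstk⟩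
  | cons ch t ih =>
      intro stk cur hcur hstk hbal
      by_cases hs : ch = '/'
      · subst hs
        have hB : pvStepB (some (stk, cur)) '/' = some (cur :: stk, []) := by
          simp [pvStepB]
        have hA : pvStepA (some (pvConv stk cur)) '/' = some (pvConv (cur :: stk) []) := by
          simp [pvStepA, pvConv]
        have hbal' : ∀ n ≤ t.length,
            (t.take n).count '\\' ≤ (t.take n).count '/' + (cur :: stk).length := by
          intro n hn
          have := hbal (n + 1) (by simpa using Nat.succ_le_succ hn)
          simp at this ⊢
          omega
        obtain ⟨stk', cur', h1, h2, h3, h4⟩ :=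
          ih (cur :: stk) [] (by simp)
            (by intro s hsm; rcases List.mem_cons.1 hsm with h | h
                · exact h ▸ hcur
                · exact hstk s h) hbal'
        exact ⟨stk', cur', by rw [List.foldl_cons, hB]; exact h1,
          by rw [List.foldl_cons, hA]; exact h2, h3, h4⟩
      · by_cases hb : ch = '\\'
        · subst hb
          have h1le : 1 ≤ stk.length := by
            have := hbal 1 (by simp)
            simpa [List.count_cons] using this
          cases stk with
          | nil => simp at h1le
          | cons top rest =>
            have htop : '/' ∉ top := hstk top List.mem_cons_self
            have hB : pvStepB (some (top :: rest, cur)) '\\' =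
                some (rest, top ++ cur.reverse) := by
              simp [pvStepB]
            have hpop : pvPopUntilA (pvConv (top :: rest) cur) [] =
                some (top.reverse ++ rest.flatMap (fun s => '/' :: s.reverse), cur.reverse) := by
              have : pvConv (top :: rest) cur =
                  cur.reverse ++ '/' :: (top.reverse ++ rest.flatMap (fun s => '/' :: s.reverse)) := by
                simp [pvConv]
              rw [this, pvPopUntilA_skip cur.reverse (by simpa using hcur)]
              simp [pvPopUntilA]
            have hA : pvStepA (some (pvConv (top :: rest) cur)) '\\' =
                some (pvConv rest (top ++ cur.reverse)) := by
              simp only [pvStepA, Option.bind_some]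
              rw [hpop]
              simp [pvConv]
            have hbal' : ∀ n ≤ t.length,
                (t.take n).count '\\' ≤ (t.take n).count '/' + rest.length := by
              intro n hn
              have := hbal (n + 1) (by simpa using Nat.succ_le_succ hn)
              simp at this ⊢
              omega
            obtain ⟨stk', cur', h1, h2, h3, h4⟩ :=
              ih rest (top ++ cur.reverse)
                (by simp; exact ⟨htop, by simpa using hcur⟩)
                (fun s hsm => hstk s (List.mem_cons_of_mem _ hsm)) hbal'
            exact ⟨stk', cur', by rw [List.foldl_cons, hB]; exact h1,
              by rw [List.foldl_cons, hA]; exact h2, h3, h4⟩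
        · have hB : pvStepB (some (stk, cur)) ch = some (stk, cur ++ [ch]) := by
            simp [pvStepB, hs, hb]
          have hA : pvStepA (some (pvConv stk cur)) ch =
              some (pvConv stk (cur ++ [ch])) := by
            simp [pvStepA, hb, pvConv]
          have hbal' : ∀ n ≤ t.length,
              (t.take n).count '\\' ≤ (t.take n).count '/' + stk.length := by
            intro n hn
            have := hbal (n + 1) (by simpa using Nat.succ_le_succ hn)
            simp [hs, hb] at this ⊢
            omega
          obtain ⟨stk', cur', h1, h2, h3, h4⟩ :=
            ih stk (cur ++ [ch])
              (by simp; exact ⟨hcur, fun h => hs h.symm⟩) hstk hbal'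
          exact ⟨stk', cur', by rw [List.foldl_cons, hB]; exact h1,
            by rw [List.foldl_cons, hA]; exact h2, h3, h4⟩

-- ===== VERDICT (by name: the statement is the Claim_ definition above) =====
theorem alignLibrary_spec : Claim_equal_alignLibrary := by
  intro string _ hpre
  obtain ⟨stk', cur', hB, hA, _, _⟩ :=
    pvMain string.toList [] [] (by simp) (by simp)
      (by intro n hn
          have := hpre n (by simpa using Nat.lt_succ_of_le hn)
          simpa using this)
  unfold Spec_alignLibrary alignLibrary alignLibrary_alt
  have hc : pvConv ([] : List (List Char)) [] = [] := by simp [pvConv]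
  rw [hB, ← hc, hA]
  simp [pvConv_reverse]
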